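-- pv_equiv track=rewrite | github.com/axelit19/Algoritmos-de-IA | busqueda/dfs.py | dfs_iterativo
-- ===== SOURCE A (Python) =====
-- def dfs_iterativo(grafo, inicio, objetivo):
--     """
--     Versión iterativa de DFS usando una pila explícita.
--
--     Args:
--         grafo: dict con listas de adyacencia {nodo: [vecinos]}
--         inicio: nodo de partida
--         objetivo: nodo destino
--
--     Returns:
--         lista con el camino encontrado, o None si no existe
--     """
--     pila = [[inicio]]
--     visitados = set()
--
--     while pila:
--         camino = pila.pop()
--         nodo_actual = camino[-1]
--
--         if nodo_actual == objetivo: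
--             return camino
--
--         if nodo_actual not in visitados:
--             visitados.add(nodo_actual)
--             for vecino in grafo.get(nodo_actual, []):
--                 if vecino not in visitados:
--                     pila.append(camino + [vecino])
--
--     return None
-- ===== SOURCE B (Python) =====
-- def dfs_iterativo(grafo, inicio, objetivo):
--     """Backtracking DFS with a frame stack of pending-neighbor lists and ONE
--     current path maintained by append/pop, instead of copying the whole path
--     into every stack entry."""
--     if inicio == objetivo:
--         return [inicio]
--     visitados = {inicio}
--     camino = [inicio]
--     pendientes = [[v for v in grafo.get(inicio, []) if v not in visitados]]
--     while pendientes: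
--         hijos = pendientes[-1]
--         if not hijos:
--             pendientes.pop()
--             camino.pop()
--             continue
--         v = hijos.pop()
--         if v in visitados:
--             continue
--         if v == objetivo:
--             camino.append(v)
--             return camino
--         visitados.add(v)
--         camino.append(v)
--         pendientes.append([w for w in grafo.get(v, []) if w not in visitados])
--     return None
-- ===== Notes on version B (the rewrite author's own statement) =====
-- stated objective: alternative
-- what changed: Instead of a stack of full path copies (camino + [vecino] on every push), B runs a backtracking machine: one current path maintained by append/pop plus a stack of pending-neighbor frames, so each push is O(1) and no path is ever copied.
import Mathlib
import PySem

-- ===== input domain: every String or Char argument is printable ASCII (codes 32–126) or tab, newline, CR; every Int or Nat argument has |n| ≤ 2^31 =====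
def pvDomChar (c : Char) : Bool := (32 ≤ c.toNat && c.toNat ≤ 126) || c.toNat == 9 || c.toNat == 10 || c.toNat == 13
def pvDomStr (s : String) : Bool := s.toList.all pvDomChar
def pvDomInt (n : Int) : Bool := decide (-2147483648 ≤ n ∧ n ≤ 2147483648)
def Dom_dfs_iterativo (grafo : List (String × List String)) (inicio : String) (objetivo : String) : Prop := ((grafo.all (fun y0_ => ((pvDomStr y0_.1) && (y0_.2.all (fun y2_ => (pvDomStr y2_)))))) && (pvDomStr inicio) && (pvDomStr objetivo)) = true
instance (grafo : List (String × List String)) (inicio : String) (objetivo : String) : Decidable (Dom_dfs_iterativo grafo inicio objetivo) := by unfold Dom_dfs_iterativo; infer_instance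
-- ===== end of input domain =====

-- B replaces A's stack of full path copies (camino + [vecino] per push) by a backtracking
-- machine: one current path plus a stack of pending-neighbor frames (objective: alternative).

-- ===== PORT A =====
-- the while-loop of A; fuel only makes the recursion structural (each iteration pops one
-- stack entry, and at most Σ|adjacency| + 1 entries are ever created, so the wrapper's
-- fuel is never exhausted before the loop ends of its own accord)
def dfsLoopA (grafo : List (String × List String)) (objetivo : String) :
    Nat → List (List String) → PySem.Set String → Option (List String)
  | 0, _, _ => none
  | _ + 1, [], _ => none
  | fuel + 1, camino :: pila, visitados =>
    match PySem.List.pyGet? camino (-1) with   -- camino[-1] (never none: stack paths are nonempty)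
    | none => none
    | some nodo_actual =>
      if nodo_actual = objetivo then some camino
      else if nodo_actual ∈ visitados then dfsLoopA grafo objetivo fuel pila visitados
      else
        let visitados' := visitados.add nodo_actual
        let pila' := ((grafo.lookup nodo_actual).getD []).foldl
          (fun st vecino => if vecino ∈ visitados' then st else (camino ++ [vecino]) :: st) pila
        dfsLoopA grafo objetivo fuel pila' visitados'

def dfs_iterativo (grafo : List (String × List String)) (inicio : String) (objetivo : String) : Option (List String) :=
  dfsLoopA grafo objetivo (2 + (grafo.map (fun p => p.2.length)).sum) [[inicio]] PySem.Set.empty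

-- ===== PORT B =====
-- a frame '[v for v in grafo.get(n, []) if v not in visitados]'; Python pops hijos from
-- the END with .pop(), so the frame is kept REVERSED here (head = next element to pop)
def newFrame (grafo : List (String × List String)) (visitados : PySem.Set String) (n : String) : List String :=
  (((grafo.lookup n).getD []).filter (fun v => !decide (v ∈ visitados))).reverse

-- B's while-loop: pendientes is the frame stack (head = top frame), camino the single
-- current path (one owner node per frame); fuel is spent only when an element is popped
-- from a frame (frame removal is structural on pendientes), and one element is popped per
-- loop pass that reaches hijos.pop(), so Σ|adjacency| + 1 passes of fuel always suffice
def dfsLoopB (grafo : List (String × List String)) (objetivo : String) :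
    Nat → List (List String) → List String → PySem.Set String → Option (List String)
  | _, [], _, _ => none                                         -- while pendientes: … exhausted
  | fuel, [] :: pendientes, camino, visitados =>                -- if not hijos: pop frame, backtrack
    dfsLoopB grafo objetivo fuel pendientes camino.dropLast visitados
  | 0, (_ :: _) :: _, _, _ => none
  | fuel + 1, (v :: hijos) :: pendientes, camino, visitados =>  -- v = hijos.pop()
    if v ∈ visitados then dfsLoopB grafo objetivo fuel (hijos :: pendientes) camino visitados
    else if v = objetivo then some (camino ++ [v])
    else dfsLoopB grafo objetivo fuel
      (newFrame grafo (visitados.add v) v :: hijos :: pendientes)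
      (camino ++ [v]) (visitados.add v)
  termination_by fuel pendientes => (fuel, pendientes.length)

def dfs_iterativo_alt (grafo : List (String × List String)) (inicio : String) (objetivo : String) : Option (List String) :=
  if inicio = objetivo then some [inicio]
  else
    let visitados := PySem.Set.empty.add inicio   -- {inicio}
    dfsLoopB grafo objetivo (1 + (grafo.map (fun p => p.2.length)).sum)
      [newFrame grafo visitados inicio] [inicio] visitados

-- ===== PRECONDITION & SPEC =====
def Spec_dfs_iterativo (grafo : List (String × List String)) (inicio : String) (objetivo : String) (out : Option (List String)) : Prop := out = dfs_iterativo_alt grafo inicio objetivo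
instance (grafo : List (String × List String)) (inicio : String) (objetivo : String) (out : Option (List String)) : Decidable (Spec_dfs_iterativo grafo inicio objetivo out) := by unfold Spec_dfs_iterativo; infer_instance

-- ===== CLAIM (what is proved, stated in full; the proofs are below) =====
def Claim_equal_dfs_iterativo : Prop := ∀ (grafo : List (String × List String)) (inicio : String) (objetivo : String), Dom_dfs_iterativo grafo inicio objetivo → Spec_dfs_iterativo grafo inicio objetivo (dfs_iterativo grafo inicio objetivo)

-- ===== LEMMAS AND PROOFS =====

-- A's stack contents denoted by a B state: each frame contributes the full paths of its
-- pending entries, below frames use one-shorter path prefixes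
def flatA : List (List String) → List String → List (List String)
  | [], _ => []
  | hijos :: pendientes, camino => hijos.map (fun v => camino ++ [v]) ++ flatA pendientes camino.dropLast

-- A's push loop over an adjacency list builds exactly the (reversed, filtered) frame paths
theorem pushA_eq (vis : PySem.Set String) (pref : List String) (adj : List String) :
    ∀ (st : List (List String)),
      adj.foldl (fun st vecino => if vecino ∈ vis then st else (pref ++ [vecino]) :: st) st
      = ((adj.filter (fun v => !decide (v ∈ vis))).reverse).map (fun v => pref ++ [v]) ++ st := by
  induction adj with
  | nil => intro st; simp
  | cons a l ih =>
    intro st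
    by_cases ha : a ∈ vis <;> simp [ha, ih]

-- the simulation: with objetivo unvisited and one path node per frame, A's loop on the
-- denoted stack equals B's loop (B spends fuel exactly when A pops an entry)
theorem loop_sim (grafo : List (String × List String)) (objetivo : String) :
    ∀ (fuel : Nat) (pendientes : List (List String)) (camino : List String) (vis : PySem.Set String),
      camino.length = pendientes.length → objetivo ∉ vis →
      dfsLoopA grafo objetivo fuel (flatA pendientes camino) vis
        = dfsLoopB grafo objetivo fuel pendientes camino vis := by
  intro fuel
  induction fuel using Nat.strong_induction_on with
  | _ fuel ihf =>
    intro pendientes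
    induction pendientes with
    | nil =>
      intro camino vis _ _
      cases fuel <;> simp [flatA, dfsLoopA, dfsLoopB]
    | cons hijos rest ihp =>
      intro camino vis hlen hobj
      cases hijos with
      | nil =>
        have : flatA ([] :: rest) camino = flatA rest camino.dropLast := by simp [flatA]
        rw [this, dfsLoopB]
        exact ihp camino.dropLast vis (by rw [List.length_dropLast, hlen]; simp) hobj
      | cons v hs =>
        cases fuel with
        | zero => simp [dfsLoopA, dfsLoopB]
        | succ f =>
          have hflat : flatA ((v :: hs) :: rest) camino
              = (camino ++ [v]) :: (hs.map (fun w => camino ++ [w]) ++ flatA rest camino.dropLast) := by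
            simp [flatA]
          rw [hflat, dfsLoopA, PySem.List.pyGet?_neg_one_append_singleton]
          simp only [dfsLoopB]
          by_cases hv : v ∈ vis
          · have hne : ¬ v = objetivo := fun h => hobj (h ▸ hv)
            simp only [if_neg hne, if_pos hv]
            have := ihf f (Nat.lt_succ_self f) (hs :: rest) camino vis (by simpa using hlen) hobj
            simpa [flatA] using this
          · simp only [if_neg hv]
            by_cases hgoal : v = objetivo
            · simp [hgoal]
            · simp only [if_neg hgoal]
              have hrec := ihf f (Nat.lt_succ_self f)
                (newFrame grafo (vis.add v) v :: hs :: rest) (camino ++ [v]) (vis.add v)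
                (by simpa using hlen)
                (by
                  intro hmem
                  rcases (PySem.Set.mem_add _ _ _).1 hmem with h | h
                  · exact hobj h
                  · exact hgoal h.symm)
              rw [pushA_eq]
              have hflat2 : flatA (newFrame grafo (vis.add v) v :: hs :: rest) (camino ++ [v])
                  = (newFrame grafo (vis.add v) v).map (fun w => (camino ++ [v]) ++ [w])
                    ++ (hs.map (fun w => camino ++ [w]) ++ flatA rest camino.dropLast) := by
                simp [flatA]
              rw [hflat2] at hrec
              simpa [newFrame] using hrec

-- ===== VERDICT (by name: the statement is the Claim_ definition above) =====
theorem dfs_iterativo_spec : Claim_equal_dfs_iterativo := by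
  intro grafo inicio objetivo _
  unfold Spec_dfs_iterativo dfs_iterativo dfs_iterativo_alt
  rw [show (2 + (grafo.map (fun p => p.2.length)).sum)
      = (1 + (grafo.map (fun p => p.2.length)).sum) + 1 by omega]
  rw [dfsLoopA]
  rw [show PySem.List.pyGet? [inicio] (-1) = some inicio from
    PySem.List.pyGet?_neg_one_append_singleton [] inicio]
  by_cases hgoal : inicio = objetivo
  · simp [hgoal]
  · have hvis : inicio ∉ (PySem.Set.empty : PySem.Set String) := by simp [PySem.Set.empty]
    simp only [if_neg hgoal, if_neg hvis]
    rw [pushA_eq]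
    have := loop_sim grafo objetivo (1 + (grafo.map (fun p => p.2.length)).sum)
      [newFrame grafo (PySem.Set.empty.add inicio) inicio] [inicio]
      (PySem.Set.empty.add inicio) (by simp)
      (by
        intro hmem
        rcases (PySem.Set.mem_add _ _ _).1 hmem with h | h
        · simp [PySem.Set.empty] at h
        · exact hgoal h.symm)
    rw [← this]
    simp [flatA, newFrame]
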